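-- pv_equiv track=rewrite | github.com/brsynth/molecule-signature | src/signature/solve_partitions.py | partitions_groups
-- ===== SOURCE A (Python) =====
-- def partitions_groups(partitions_involved):
--     """
--     Compute the groups of partitions involved in solutions.
--
--     This function computes the groups of partitions involved in solutions, where a group is a set of partitions
--     that are interconnected through their involvement in solutions.
--
--     Parameters
--     ----------
--     dict_sols_per_eq : dict
--         Dictionary containing the solutions for each line.
--
--     Returns
--     -------
--     list
--         List of sets representing the groups of partitions involved in solutions.
--     """
--
--     parts_groups = []
--     while len(partitions_involved) > 0:
--         group = set(partitions_involved[0])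
--         partitions_involved.remove(partitions_involved[0])
--         find_one = True
--         while find_one:
--             find_one = False
--             i = 0
--             while i < len(partitions_involved):
--                 if len(set.intersection(set(partitions_involved[i]), group)) > 0:
--                     group = group | set(partitions_involved[i])
--                     partitions_involved.remove(partitions_involved[i])
--                     find_one = True
--                 else:
--                     i = i + 1
--         parts_groups.append(group)
--     return parts_groups
-- ===== SOURCE B (Python) =====
-- def partitions_groups(partitions_involved):
--     """Functional re-implementation: instead of A's in-place index-and-remove scan,
--     each round is one left-to-right pass rebuilding the leftover list afresh.
--     Note: unlike A, this does NOT mutate (empty) its argument; return value is identical."""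
--     groups = []
--     pending = partitions_involved
--     while pending:
--         group = set(pending[0])
--         pending = pending[1:]
--         changed = True
--         while changed:
--             changed = False
--             leftover = []
--             for p in pending:
--                 if group.isdisjoint(p):
--                     leftover.append(p)
--                 else:
--                     group |= set(p)
--                     changed = True
--             pending = leftover
--         groups.append(group)
--     return groups
-- ===== Notes on version B (the rewrite author's own statement) =====
-- stated objective: faster
-- what changed: A's in-place scanning (index juggling over a mutated list, an O(n) list.remove per absorbed partition, and a freshly built set plus full intersection per test) is replaced by pure functional passes: each round is one left-to-right sweep that rebuilds the leftover list and tests with the short-circuiting group.isdisjoint; the pass-to-fixpoint schedule is kept because it determines the exact groups returned; B also does not mutate its argument (A empties it in place).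
import Mathlib
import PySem

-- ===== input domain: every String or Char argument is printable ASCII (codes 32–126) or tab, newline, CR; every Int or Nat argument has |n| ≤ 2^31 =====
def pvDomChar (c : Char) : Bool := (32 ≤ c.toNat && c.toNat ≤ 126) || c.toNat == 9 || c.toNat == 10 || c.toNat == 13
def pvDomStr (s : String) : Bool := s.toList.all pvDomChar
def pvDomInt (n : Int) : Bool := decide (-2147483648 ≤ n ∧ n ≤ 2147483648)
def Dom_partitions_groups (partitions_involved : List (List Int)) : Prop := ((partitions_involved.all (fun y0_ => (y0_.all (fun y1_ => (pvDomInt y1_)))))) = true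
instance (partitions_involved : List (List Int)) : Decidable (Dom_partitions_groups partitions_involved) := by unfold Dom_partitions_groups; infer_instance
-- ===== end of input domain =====

-- B replaces A's in-place index-and-remove scanning by pure left-to-right passes that
-- rebuild the pending list (same return value; unlike A, B does not empty its argument,
-- which A mutates in place — the equivalence proved here is about the return value).

-- ===== PORT A =====
-- inner `while i < len(...)` scan of A (index, group, find_one flag; the fuel argument
-- only makes the loop structurally recursive — L.length - i + 1 steps always suffice)
def pgScan (fuel : Nat) (L : List (List Int)) (i : Nat) (g : PySem.Set Int) (found : Bool) :
    PySem.Set Int × List (List Int) × Bool :=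
  match fuel with
  | 0 => (g, L, found)
  | fuel + 1 =>
    if h : i < L.length then
      if 0 < PySem.Set.len (PySem.Set.inter (PySem.Set.ofList L[i]) g) then
        -- group = group | set(L[i]); L.remove(L[i])  (list.remove deletes the first equal element)
        pgScan fuel ((PySem.List.remove? L L[i]).getD L) i
          (PySem.Set.union g (PySem.Set.ofList L[i])) true
      else
        pgScan fuel L (i + 1) g found
    else (g, L, found)

-- outer `while find_one` loop of A (each found round shortens the list, so
-- L.length + 1 rounds of fuel always suffice)
def pgFix (fuel : Nat) (L : List (List Int)) (g : PySem.Set Int) :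
    PySem.Set Int × List (List Int) :=
  match fuel with
  | 0 => (g, L)
  | fuel + 1 =>
    if (pgScan (L.length + 1) L 0 g false).2.2 then
      pgFix fuel (pgScan (L.length + 1) L 0 g false).2.1 (pgScan (L.length + 1) L 0 g false).1
    else ((pgScan (L.length + 1) L 0 g false).1, (pgScan (L.length + 1) L 0 g false).2.1)

-- `while len(partitions_involved) > 0` (one group is emitted per round)
def pgMain (fuel : Nat) (L : List (List Int)) : List (List Int) :=
  match fuel with
  | 0 => []
  | fuel + 1 =>
    match L with
    | [] => []
    | p :: rest =>
      -- group = set(partitions_involved[0]); partitions_involved.remove(partitions_involved[0])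
      -- (list.remove of the element at index 0 deletes exactly index 0)
      (pgFix (rest.length + 1) rest (PySem.Set.ofList p)).1 ::
        pgMain fuel (pgFix (rest.length + 1) rest (PySem.Set.ofList p)).2

def partitions_groups (partitions_involved : List (List Int)) : List (List Int) :=
  pgMain (partitions_involved.length + 1) partitions_involved

-- ===== PORT B =====
-- body of B's `for p in pending` pass (accumulator: group, leftover, changed)
def pgStep (acc : PySem.Set Int × List (List Int) × Bool) (p : List Int) :
    PySem.Set Int × List (List Int) × Bool :=
  if PySem.Set.isdisjoint acc.1 p then (acc.1, acc.2.1 ++ [p], acc.2.2)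
  else (PySem.Set.union acc.1 (PySem.Set.ofList p), acc.2.1, true)

-- one pass: leftover = [], changed = False, then the for loop
def pgPass (g : PySem.Set Int) (pending : List (List Int)) :
    PySem.Set Int × List (List Int) × Bool :=
  pending.foldl pgStep (g, [], false)

-- B's `while changed` loop (each changed pass shortens the list; fuel as in pgFix)
def pgFixB (fuel : Nat) (g : PySem.Set Int) (pending : List (List Int)) :
    PySem.Set Int × List (List Int) :=
  match fuel with
  | 0 => (g, pending)
  | fuel + 1 =>
    if (pgPass g pending).2.2 then
      pgFixB fuel (pgPass g pending).1 (pgPass g pending).2.1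
    else ((pgPass g pending).1, (pgPass g pending).2.1)

-- B's `while pending` loop
def pgMainB (fuel : Nat) (L : List (List Int)) : List (List Int) :=
  match fuel with
  | 0 => []
  | fuel + 1 =>
    match L with
    | [] => []
    | p :: rest =>
      (pgFixB (rest.length + 1) (PySem.Set.ofList p) rest).1 ::
        pgMainB fuel (pgFixB (rest.length + 1) (PySem.Set.ofList p) rest).2

def partitions_groups_alt (partitions_involved : List (List Int)) : List (List Int) :=
  pgMainB (partitions_involved.length + 1) partitions_involved

-- ===== PRECONDITION & SPEC =====
def Spec_partitions_groups (partitions_involved : List (List Int)) (out : List (List Int)) : Prop := out = partitions_groups_alt partitions_involved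
instance (partitions_involved : List (List Int)) (out : List (List Int)) : Decidable (Spec_partitions_groups partitions_involved out) := by unfold Spec_partitions_groups; infer_instance

-- ===== CLAIM (what is proved, stated in full; the proofs are below) =====
def Claim_equal_partitions_groups : Prop := ∀ (partitions_involved : List (List Int)), Dom_partitions_groups partitions_involved → Spec_partitions_groups partitions_involved (partitions_groups partitions_involved)

-- ===== LEMMAS AND PROOFS =====

theorem pgScan_len_le (n : Nat) :
    ∀ (L : List (List Int)) (i : Nat) (g : PySem.Set Int) (b : Bool),
      (pgScan n L i g b).2.1.length ≤ L.length := by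
  induction n with
  | zero => intro L i g b; simp [pgScan]
  | succ n ih =>
    intro L i g b
    rw [pgScan]
    by_cases h : i < L.length
    · rw [dif_pos h]
      by_cases hc : 0 < PySem.Set.len (PySem.Set.inter (PySem.Set.ofList L[i]) g)
      · rw [if_pos hc]
        have hm : L[i] ∈ L := List.getElem_mem h
        have he : (PySem.List.remove? L L[i]).getD L = L.erase L[i] := by
          rw [PySem.List.remove?_eq_some_erase L L[i] hm]; rfl
        have h2 := ih ((PySem.List.remove? L L[i]).getD L) i
          (PySem.Set.union g (PySem.Set.ofList L[i])) true
        have hX : ((PySem.List.remove? L L[i]).getD L).length = L.length - 1 := by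
          rw [he, List.length_erase_of_mem hm]
        omega
      · rw [if_neg hc]; exact ih L (i + 1) g b
    · rw [dif_neg h]

theorem pgScan_flag_lt (n : Nat) :
    ∀ (L : List (List Int)) (i : Nat) (g : PySem.Set Int),
      (pgScan n L i g false).2.2 = true → (pgScan n L i g false).2.1.length < L.length := by
  induction n with
  | zero => intro L i g hf; simp [pgScan] at hf
  | succ n ih =>
    intro L i g hf
    rw [pgScan] at hf ⊢
    by_cases h : i < L.length
    · rw [dif_pos h] at hf ⊢
      by_cases hc : 0 < PySem.Set.len (PySem.Set.inter (PySem.Set.ofList L[i]) g)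
      · rw [if_pos hc] at hf ⊢
        have hm : L[i] ∈ L := List.getElem_mem h
        have he : (PySem.List.remove? L L[i]).getD L = L.erase L[i] := by
          rw [PySem.List.remove?_eq_some_erase L L[i] hm]; rfl
        have h2 := pgScan_len_le n ((PySem.List.remove? L L[i]).getD L) i
          (PySem.Set.union g (PySem.Set.ofList L[i])) true
        have hpos : 0 < L.length := List.length_pos_of_mem hm
        have hX : ((PySem.List.remove? L L[i]).getD L).length = L.length - 1 := by
          rw [he, List.length_erase_of_mem hm]
        omega
      · rw [if_neg hc] at hf ⊢; exact ih L (i + 1) g hf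
    · rw [dif_neg h] at hf
      simp at hf

theorem pgPass_foldl_len (M : List (List Int)) :
    ∀ (g : PySem.Set Int) (lo : List (List Int)) (ch : Bool),
      (M.foldl pgStep (g, lo, ch)).2.1.length ≤ lo.length + M.length := by
  induction M with
  | nil => intro g lo ch; simp [List.foldl]
  | cons p rest ih =>
    intro g lo ch
    simp only [List.foldl_cons, pgStep]
    split
    · have := ih g (lo ++ [p]) ch
      simp only [List.length_append, List.length_nil, List.length_cons] at this ⊢
      omega
    · have := ih (PySem.Set.union g (PySem.Set.ofList p)) lo true
      simp only [List.length_cons]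
      omega

theorem pgPass_flag_lt (M : List (List Int)) :
    ∀ (g : PySem.Set Int) (lo : List (List Int)),
      (M.foldl pgStep (g, lo, false)).2.2 = true →
      (M.foldl pgStep (g, lo, false)).2.1.length < lo.length + M.length := by
  induction M with
  | nil => intro g lo h; simp [List.foldl] at h
  | cons p rest ih =>
    intro g lo h
    simp only [List.foldl_cons, pgStep] at h ⊢
    split at h
    · rename_i hd
      rw [if_pos hd]
      have := ih g (lo ++ [p]) h
      simp only [List.length_append, List.length_nil, List.length_cons] at this ⊢
      omega
    · rename_i hd
      rw [if_neg hd]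
      have := pgPass_foldl_len rest (PySem.Set.union g (PySem.Set.ofList p)) lo true
      simp only [List.length_cons]
      omega

theorem pgFixB_len_le (n : Nat) :
    ∀ (g : PySem.Set Int) (pending : List (List Int)),
      (pgFixB n g pending).2.length ≤ pending.length := by
  induction n with
  | zero => intro g pending; simp [pgFixB]
  | succ n ih =>
    intro g pending
    rw [pgFixB]
    by_cases hf : (pgPass g pending).2.2 = true
    · rw [if_pos hf]
      refine le_trans (ih _ _) ?_
      have := pgPass_foldl_len pending g [] false
      simpa [pgPass] using this
    · rw [if_neg hf]
      have := pgPass_foldl_len pending g [] false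
      simpa [pgPass] using this

-- `satB g p`: p is a nonempty partition all of whose elements are already in the group g.
-- Such partitions are always absorbed by a pass and never change the group; they are
-- exactly the entries A's `list.remove` may delete at a different position than B does.
def satB (g : PySem.Set Int) (p : List Int) : Bool := decide (p ≠ [] ∧ ∀ x ∈ p, x ∈ g)

-- pending lists that agree outside saturated entries (and agree on having one at all)
def PendRel (g : PySem.Set Int) (L M : List (List Int)) : Prop :=
  L.filter (fun p => !satB g p) = M.filter (fun p => !satB g p) ∧
  L.any (satB g) = M.any (satB g)

theorem pendrel_refl (g : PySem.Set Int) (L : List (List Int)) : PendRel g L L := ⟨rfl, rfl⟩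

-- recursive form of one B pass (proof vehicle for the foldl in pgPass)
def passAux (g : PySem.Set Int) : List (List Int) → PySem.Set Int × List (List Int) × Bool
  | [] => (g, [], false)
  | p :: rest =>
    if PySem.Set.isdisjoint g p then
      ((passAux g rest).1, p :: (passAux g rest).2.1, (passAux g rest).2.2)
    else
      ((passAux (PySem.Set.union g (PySem.Set.ofList p)) rest).1,
       (passAux (PySem.Set.union g (PySem.Set.ofList p)) rest).2.1, true)

theorem foldl_pgStep (M : List (List Int)) :
    ∀ (g : PySem.Set Int) (lo : List (List Int)) (ch : Bool),
      M.foldl pgStep (g, lo, ch) =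
        ((passAux g M).1, lo ++ (passAux g M).2.1, ch || (passAux g M).2.2) := by
  induction M with
  | nil => intro g lo ch; simp [List.foldl, passAux]
  | cons p rest ih =>
    intro g lo ch
    simp only [List.foldl_cons, pgStep, passAux]
    split
    · rw [ih g (lo ++ [p]) ch]; simp
    · rw [ih (PySem.Set.union g (PySem.Set.ofList p)) lo true]; simp

theorem pgPass_eq_passAux (g : PySem.Set Int) (M : List (List Int)) :
    pgPass g M = passAux g M := by
  rw [pgPass, foldl_pgStep]
  simp

theorem union_mem_left {g t : PySem.Set Int} {x : Int} (h : x ∈ g) :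
    x ∈ PySem.Set.union g t := (PySem.Set.mem_union _ _ _).mpr (Or.inl h)

theorem union_ofList_subset {g : PySem.Set Int} {p : List Int} (h : ∀ x ∈ p, x ∈ g) :
    PySem.Set.union g (PySem.Set.ofList p) = g := by
  show PySem.Set.update g (PySem.Set.ofList p) = g
  rw [PySem.Set.update_eq_append_filter, PySem.Set.ofList_ofList]
  have : ((PySem.Set.ofList p).filter (fun y => !(PySem.Set.contains g y))) = [] := by
    apply List.filter_eq_nil_iff.mpr
    intro y hy
    have hyp : y ∈ p := (PySem.Set.mem_ofList _ _).mp hy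
    have := h y hyp
    simp [this]
  rw [this, List.append_nil]

theorem cond_iff (p : List Int) (g : PySem.Set Int) :
    (0 < PySem.Set.len (PySem.Set.inter (PySem.Set.ofList p) g)) ↔
      ¬ (PySem.Set.isdisjoint g p = true) := by
  have hlen : PySem.Set.len (PySem.Set.inter (PySem.Set.ofList p) g) =
      ((PySem.Set.inter (PySem.Set.ofList p) g).length : Int) := rfl
  constructor
  · intro h hd
    have hne : PySem.Set.inter (PySem.Set.ofList p) g ≠ [] := by
      intro hnil
      rw [hlen, hnil] at h
      simp at h
    obtain ⟨y, hy⟩ := List.exists_mem_of_ne_nil _ hne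
    have hy' := (PySem.Set.mem_inter _ _ _).mp hy
    exact ((PySem.Set.isdisjoint_iff _ _).mp hd) y hy'.2 ((PySem.Set.mem_ofList _ _).mp hy'.1)
  · intro hd
    rw [hlen]
    have hne : PySem.Set.inter (PySem.Set.ofList p) g ≠ [] := by
      intro hnil
      apply hd
      apply (PySem.Set.isdisjoint_iff _ _).mpr
      intro x hxg hxp
      have : x ∈ PySem.Set.inter (PySem.Set.ofList p) g :=
        (PySem.Set.mem_inter _ _ _).mpr ⟨(PySem.Set.mem_ofList _ _).mpr hxp, hxg⟩
      rw [hnil] at this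
      exact absurd this (List.not_mem_nil)
    exact_mod_cast List.length_pos_iff.mpr hne

theorem sat_not_disjoint {g0 g : PySem.Set Int} {p : List Int}
    (hsub : ∀ x ∈ g0, x ∈ g) (hs : satB g0 p = true) :
    ¬ (PySem.Set.isdisjoint g p = true) := by
  have hs' := of_decide_eq_true hs
  obtain ⟨x, hx⟩ := List.exists_mem_of_ne_nil _ hs'.1
  intro hd
  exact ((PySem.Set.isdisjoint_iff _ _).mp hd) x (hsub x (hs'.2 x hx)) hx

theorem disjoint_not_sat {g : PySem.Set Int} {p : List Int}
    (hd : PySem.Set.isdisjoint g p = true) : satB g p = false := by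
  apply decide_eq_false
  rintro ⟨hne, hall⟩
  obtain ⟨x, hx⟩ := List.exists_mem_of_ne_nil _ hne
  exact ((PySem.Set.isdisjoint_iff _ _).mp hd) x (hall x hx) hx

theorem passAux_grp_mono (L : List (List Int)) :
    ∀ (g : PySem.Set Int) (x : Int), x ∈ g → x ∈ (passAux g L).1 := by
  induction L with
  | nil => intro g x hx; simpa [passAux] using hx
  | cons p rest ih =>
    intro g x hx
    simp only [passAux]
    split
    · exact ih g x hx
    · exact ih _ x (union_mem_left hx)

-- one pass ignores saturated entries: they are absorbed, change nothing, and set `changed`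
theorem passAux_skip_sat (g0 : PySem.Set Int) (L : List (List Int)) :
    ∀ (g : PySem.Set Int), (∀ x ∈ g0, x ∈ g) →
      passAux g L =
        ((passAux g (L.filter (fun p => !satB g0 p))).1,
         (passAux g (L.filter (fun p => !satB g0 p))).2.1,
         (L.any (satB g0) || (passAux g (L.filter (fun p => !satB g0 p))).2.2)) := by
  induction L with
  | nil => intro g _; simp [passAux]
  | cons p rest ih =>
    intro g hsub
    by_cases hs : satB g0 p = true
    · have hnd : ¬ (PySem.Set.isdisjoint g p = true) := sat_not_disjoint hsub hs
      have hsp : ∀ x ∈ p, x ∈ g := by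
        have hs' := of_decide_eq_true hs
        exact fun x hx => hsub x (hs'.2 x hx)
      have hu : PySem.Set.union g (PySem.Set.ofList p) = g := union_ofList_subset hsp
      simp only [passAux, if_neg hnd, hu, List.filter_cons, hs, Bool.not_true,
        Bool.false_eq_true, if_false, List.any_cons, Bool.true_or]
      rw [ih g hsub]
    · have hs' : satB g0 p = false := by simpa using hs
      simp only [passAux, List.filter_cons, hs', Bool.not_false, List.any_cons, Bool.false_or,
        if_true]

      by_cases hd : PySem.Set.isdisjoint g p = true
      · simp only [if_pos hd]
        rw [ih g hsub]
      · have hsub' : ∀ x ∈ g0, x ∈ PySem.Set.union g (PySem.Set.ofList p) :=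
          fun x hx => union_mem_left (hsub x hx)
        simp only [if_neg hd]
        rw [ih _ hsub']
        simp

theorem passAux_congr {g : PySem.Set Int} {L M : List (List Int)} (h : PendRel g L M) :
    passAux g L = passAux g M := by
  rw [passAux_skip_sat g L g (fun x hx => hx), passAux_skip_sat g M g (fun x hx => hx),
    h.1, h.2]

theorem passAux_of_flag_false (L : List (List Int)) :
    ∀ (g : PySem.Set Int), (passAux g L).2.2 = false →
      passAux g L = (g, L, false) ∧ ∀ p ∈ L, PySem.Set.isdisjoint g p = true := by
  induction L with
  | nil => intro g _; exact ⟨rfl, by simp⟩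
  | cons p rest ih =>
    intro g hf
    simp only [passAux] at hf ⊢
    by_cases hd : PySem.Set.isdisjoint g p = true
    · rw [if_pos hd] at hf ⊢
      obtain ⟨h1, h2⟩ := ih g hf
      rw [h1]
      exact ⟨rfl, by
        intro q hq
        rcases List.mem_cons.mp hq with h | h
        · exact h ▸ hd
        · exact h2 q h⟩
    · rw [if_neg hd] at hf
      simp at hf
    
theorem filter_erase_false {f : List Int → Bool} {p : List Int} (hf : f p = false) :
    ∀ (l : List (List Int)), (l.erase p).filter f = l.filter f := by
  intro l
  induction l with
  | nil => rfl
  | cons a l ih =>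
    by_cases ha : a = p
    · subst ha
      rw [List.erase_cons_head, List.filter_cons, hf]
      simp
    · rw [List.erase_cons_tail (by simpa using ha), List.filter_cons, List.filter_cons, ih]

theorem pendrel_erase_block {g : PySem.Set Int} {p : List Int} (A X : List (List Int))
    (hs : satB g p = true) :
    PendRel g ((A ++ [p]).erase p ++ X) (A ++ X) := by
  by_cases hp : p ∈ A
  · rw [List.erase_append_left _ hp]
    constructor
    · simp only [List.filter_append]
      rw [filter_erase_false (f := fun q => !satB g q) (by simp [hs]) A]
      simp [hs]
    · simp only [List.any_append]
      have hA : A.any (satB g) = true := List.any_eq_true.mpr ⟨p, hp, hs⟩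
      have hE : ([p].any (satB g)) = true := by simp [hs]
      simp [hA, hE]
  · rw [List.erase_append_right _ (by simpa using hp), List.erase_cons_head]
    simp [pendrel_refl]

theorem pendrel_trans {g : PySem.Set Int} {L M N : List (List Int)}
    (h1 : PendRel g L M) (h2 : PendRel g M N) : PendRel g L N :=
  ⟨h1.1.trans h2.1, h1.2.trans h2.2⟩

-- the heart of the proof: A's scan equals one B pass, up to the PendRel relation on leftovers
-- the heart of the proof: A's scan equals one B pass, up to the PendRel relation on leftovers
theorem pgScan_char (n : Nat) :
    ∀ (L : List (List Int)) (i : Nat) (g : PySem.Set Int) (b : Bool),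
      i ≤ L.length → L.length - i < n →
      (pgScan n L i g b).1 = (passAux g (L.drop i)).1 ∧
      (pgScan n L i g b).2.2 = (b || (passAux g (L.drop i)).2.2) ∧
      PendRel (passAux g (L.drop i)).1 (pgScan n L i g b).2.1
        (L.take i ++ (passAux g (L.drop i)).2.1) := by
  induction n with
  | zero => intro L i g b hle hm; omega
  | succ n ih =>
    intro L i g b hle hmeas
    rw [pgScan]
    by_cases h : i < L.length
    · rw [dif_pos h]
      by_cases hc : 0 < PySem.Set.len (PySem.Set.inter (PySem.Set.ofList L[i]) g)
      · rw [if_pos hc]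
        have hm : L[i] ∈ L := List.getElem_mem h
        have he : (PySem.List.remove? L L[i]).getD L = L.erase L[i] := by
          rw [PySem.List.remove?_eq_some_erase L L[i] hm]; rfl
        have hnd : ¬ (PySem.Set.isdisjoint g L[i] = true) := (cond_iff _ _).mp hc
        have htake : L.take (i + 1) = L.take i ++ [L[i]] := by
          rw [List.take_succ, List.getElem?_eq_getElem h]; rfl
        have hdrop : L.drop i = L[i] :: L.drop (i + 1) := List.drop_eq_getElem_cons h
        have hlenA : (L.take i).length = i := by simp [List.length_take]; omega
        have hmemT : L[i] ∈ L.take (i + 1) := by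
          exact htake ▸ List.mem_append_right _ (List.mem_singleton_self _)
        have hsplit : L.erase L[i] = (L.take (i + 1)).erase L[i] ++ L.drop (i + 1) := by
          have hgen : ∀ q : List Int, q ∈ L.take (i + 1) →
              L.erase q = (L.take (i + 1)).erase q ++ L.drop (i + 1) := by
            intro q hq
            conv_lhs => rw [← List.take_append_drop (i + 1) L]
            exact List.erase_append_left _ hq
          exact hgen L[i] hmemT
        have hlenE : ((L.take (i + 1)).erase L[i]).length = i := by
          rw [List.length_erase_of_mem hmemT, List.length_take]
          omega
        have hdropE : (L.erase L[i]).drop i = L.drop (i + 1) := by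
          rw [hsplit, List.drop_left' hlenE]
        have htakeE : (L.erase L[i]).take i = (L.take (i + 1)).erase L[i] := by
          rw [hsplit, List.take_left' hlenE]
        have hileE : i ≤ (L.erase L[i]).length := by
          rw [List.length_erase_of_mem hm]; omega
        have hmeasE : (L.erase L[i]).length - i < n := by
          rw [List.length_erase_of_mem hm]; omega
        have ihr := ih ((PySem.List.remove? L L[i]).getD L) i
          (PySem.Set.union g (PySem.Set.ofList L[i])) true (he ▸ hileE) (he ▸ hmeasE)
        rw [he] at ihr ⊢
        obtain ⟨ih1, ih2, ih3⟩ := ihr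
        rw [hdropE] at ih1 ih2 ih3
        rw [htakeE, htake] at ih3
        set g' := PySem.Set.union g (PySem.Set.ofList L[i]) with hg'
        set r' := passAux g' (L.drop (i + 1)) with hr'
        have hpass : passAux g (L.drop i) = (r'.1, r'.2.1, true) := by
          rw [hdrop]
          simp only [passAux, if_neg hnd, hr', hg']
        refine ⟨by rw [hpass]; exact ih1, by rw [hpass]; simp [ih2], ?_⟩
        rw [hpass]
        have hsat : satB r'.1 L[i] = true := by
          apply decide_eq_true
          constructor
          · intro hnil
            apply hnd
            apply (PySem.Set.isdisjoint_iff _ _).mpr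
            intro x _ hxp
            rw [hnil] at hxp
            exact absurd hxp (List.not_mem_nil)
          · intro x hx
            apply passAux_grp_mono
            exact (PySem.Set.mem_union _ _ _).mpr (Or.inr ((PySem.Set.mem_ofList _ _).mpr hx))
        exact pendrel_trans ih3 (by
          have := pendrel_erase_block (g := r'.1) (p := L[i]) (L.take i) r'.2.1 hsat
          exact ⟨this.1, this.2⟩)
      · rw [if_neg hc]
        have hd : PySem.Set.isdisjoint g L[i] = true := by
          by_contra hnd
          exact hc ((cond_iff _ _).mpr hnd)
        have hdrop : L.drop i = L[i] :: L.drop (i + 1) := List.drop_eq_getElem_cons h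
        have htake : L.take (i + 1) = L.take i ++ [L[i]] := by
          rw [List.take_succ, List.getElem?_eq_getElem h]; rfl
        obtain ⟨ih1, ih2, ih3⟩ := ih L (i + 1) g b (by omega) (by omega)
        have hpass : passAux g (L.drop i) =
            ((passAux g (L.drop (i + 1))).1, L[i] :: (passAux g (L.drop (i + 1))).2.1,
             (passAux g (L.drop (i + 1))).2.2) := by
          rw [hdrop]; simp only [passAux, if_pos hd]
        rw [hpass]
        refine ⟨ih1, ih2, ?_⟩
        have hEq : L.take i ++ L[i] :: (passAux g (L.drop (i + 1))).2.1
            = L.take (i + 1) ++ (passAux g (L.drop (i + 1))).2.1 := by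
          rw [htake, List.append_assoc]
          rfl
        rw [hEq]
        exact ih3
    · rw [dif_neg h]
      have hi : i = L.length := by omega
      subst hi
      simp [passAux, List.drop_length, List.take_length, pendrel_refl]

theorem fix_eq (n : Nat) :
    ∀ (L M : List (List Int)) (g : PySem.Set Int),
      L.length < n → M.length < n → PendRel g L M →
      pgFix n L g = pgFixB n g M := by
  induction n with
  | zero => intro L M g h1 _ _; omega
  | succ n ih =>
    intro L M g hlenL hlenM hrel
    obtain ⟨h1, h2, h3⟩ := pgScan_char (L.length + 1) L 0 g false (by omega) (by omega)
    simp only [List.drop_zero, List.take_zero, List.nil_append, Bool.false_or] at h1 h2 h3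
    have hLM : passAux g L = passAux g M := passAux_congr hrel
    rw [hLM] at h1 h2 h3
    rw [pgFix, pgFixB]
    simp only [pgPass_eq_passAux]
    by_cases hf : (passAux g M).2.2 = true
    · rw [if_pos (by rw [h2, hf]), if_pos hf, h1]
      apply ih
      · have hlt := pgScan_flag_lt (L.length + 1) L 0 g (by rw [h2, hf])
        omega
      · have hh : (pgPass g M).2.2 = true := by rw [pgPass_eq_passAux]; exact hf
        have h0 : (pgPass g M).2.1.length < ([] : List (List Int)).length + M.length :=
          pgPass_flag_lt M g [] hh
        rw [pgPass_eq_passAux] at h0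
        simp only [List.length_nil] at h0
        omega
      · exact h3
    · rw [if_neg (by rw [h2]; simpa using hf), if_neg hf]
      have hMf : (passAux g M).2.2 = false := by simpa using hf
      obtain ⟨hM1, hM2⟩ := passAux_of_flag_false M g hMf
      have hall : ∀ p ∈ M, satB g p = false := fun p hp => disjoint_not_sat (hM2 p hp)
      have hanyM : M.any (satB g) = false := by
        apply List.any_eq_false.mpr
        intro p hp
        simp [hall p hp]
      have hgM : (passAux g M).1 = g := by rw [hM1]
      have hloM : (passAux g M).2.1 = M := by rw [hM1]
      rw [hgM, hloM] at h3
      have hanyS : (pgScan (L.length + 1) L 0 g false).2.1.any (satB g) = false := by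
        rw [h3.2, hanyM]
      have hfiltS : List.filter (fun p => !satB g p) (pgScan (L.length + 1) L 0 g false).2.1 =
          (pgScan (L.length + 1) L 0 g false).2.1 := by
        apply List.filter_eq_self.mpr
        intro p hp
        have := List.any_eq_false.mp hanyS p hp
        simp [this]
      have hfiltM : List.filter (fun p => !satB g p) M = M := by
        apply List.filter_eq_self.mpr
        intro p hp
        simp [hall p hp]
      have : (pgScan (L.length + 1) L 0 g false).2.1 = M := by
        rw [← hfiltS, h3.1, hfiltM]
      rw [h1, hgM, this, hloM]

theorem main_eq (n : Nat) :
    ∀ (L : List (List Int)), L.length < n → pgMain n L = pgMainB n L := by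
  induction n with
  | zero => intro L h; omega
  | succ n ih =>
    intro L hlen
    match L with
    | [] => simp [pgMain, pgMainB]
    | p :: rest =>
      rw [pgMain, pgMainB]
      have hfix : pgFix (rest.length + 1) rest (PySem.Set.ofList p)
          = pgFixB (rest.length + 1) (PySem.Set.ofList p) rest :=
        fix_eq (rest.length + 1) rest rest (PySem.Set.ofList p)
          (by omega) (by omega) (pendrel_refl _ _)
      rw [hfix]
      congr 1
      apply ih
      have := pgFixB_len_le (rest.length + 1) (PySem.Set.ofList p) rest
      simp only [List.length_cons] at hlen
      omega

-- ===== VERDICT (by name: the statement is the Claim_ definition above) =====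
theorem partitions_groups_spec : Claim_equal_partitions_groups := by
  intro L _
  show partitions_groups L = partitions_groups_alt L
  rw [partitions_groups, partitions_groups_alt]
  exact main_eq (L.length + 1) L (by omega)
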